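-- pv_equiv track=rewrite | github.com/ellevaoche/Advent-of-Code-2025-exchange | exercises/day03/VukDjuranovic/day3_puzzle1.py | find_maximum_joltages
-- ===== SOURCE A (Python) =====
-- def find_maximum_joltages(joltages, current_str = ''):
--     max = 0
--     max_pos = 0
--     for i, j in enumerate(joltages[:-1]):
--         if j > max:
--             max = j
--             max_pos = i
--
--     if len(current_str) == 0:
--         n_joltages = joltages + [0]
--         second_max = find_maximum_joltages(n_joltages[max_pos+1:], str(max))
--         return int(str(max) + str(second_max))
--
--     return max
-- ===== SOURCE B (Python) =====
-- def find_maximum_joltages(joltages, current_str=''):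
--     m = 0
--     pos = 0
--     for i, j in enumerate(joltages[:-1]):
--         if j > m:
--             m = j
--             pos = i
--     if current_str:
--         return m
--     second = 0
--     for j in joltages[pos+1:]:
--         if j > second:
--             second = j
--     return int(str(m) + str(second))
-- ===== Notes on version B (the rewrite author's own statement) =====
-- stated objective: simpler
-- what changed: Replaces A's self-recursion on an appended-sentinel list (joltages+[0] sliced and re-scanned through a second call that re-enters the enumerate/branch machinery) with two plain iterative scans: one enumerate scan for the max and its position, then a direct value-only scan of joltages[pos+1:] for the second max.
import Mathlib
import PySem

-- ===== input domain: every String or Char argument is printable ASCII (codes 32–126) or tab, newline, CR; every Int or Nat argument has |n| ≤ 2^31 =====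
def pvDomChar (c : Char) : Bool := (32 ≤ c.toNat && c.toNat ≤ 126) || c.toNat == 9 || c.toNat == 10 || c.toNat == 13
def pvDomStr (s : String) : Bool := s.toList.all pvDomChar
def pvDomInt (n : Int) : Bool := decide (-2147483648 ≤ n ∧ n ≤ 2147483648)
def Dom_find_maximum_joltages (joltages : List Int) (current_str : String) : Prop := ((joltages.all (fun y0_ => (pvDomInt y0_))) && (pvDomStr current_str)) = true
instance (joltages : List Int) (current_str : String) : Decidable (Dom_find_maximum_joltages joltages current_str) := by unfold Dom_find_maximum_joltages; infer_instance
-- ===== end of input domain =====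

-- B replaces A's one-level self-recursion (on joltages+[0] sliced past the max) by a second plain
-- iterative scan of joltages[pos+1:]; simpler, same O(n) cost, same return value on every input.

-- termination helper for port A (cited by decreasing_by): str(n) is never empty
theorem pvToDigitsCore_len_ge (b : ℕ) : ∀ (f n : ℕ) (l : List Char), l.length ≤ (Nat.toDigitsCore b f n l).length := by
  intro f
  induction f with
  | zero => intro n l; simp [Nat.toDigitsCore]
  | succ f ih =>
    intro n l
    simp only [Nat.toDigitsCore]
    split
    · simp
    · exact le_trans (by simp) (ih (n / b) (Nat.digitChar (n % b) :: l))

theorem pvToChars_ne_nil (n : Int) : PySem.Int.toChars n ≠ [] := by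
  unfold PySem.Int.toChars
  split
  · simp
  · unfold Nat.toDigits
    simp only [Nat.toDigitsCore]
    split
    · simp
    · intro h
      have := pvToDigitsCore_len_ge 10 n.toNat (n.toNat / 10) [Nat.digitChar (n.toNat % 10)]
      rw [h] at this
      simp at this

-- ===== PORT A =====
def find_maximum_joltages (joltages : List Int) (current_str : String) : Int :=
  -- for i, j in enumerate(joltages[:-1]): if j > max: max, max_pos = j, i
  let p := (PySem.List.enumerate (PySem.List.slice joltages none (some (-1)))).foldl
      (fun (st : Int × Int) ij => if ij.2 > st.1 then (ij.2, ij.1) else st) (0, 0)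
  if h : PySem.Str.len current_str = 0 then
    let n_joltages := joltages ++ [0]
    let second_max := find_maximum_joltages (PySem.List.slice n_joltages (some (p.2 + 1)) none) (PySem.Int.toStr p.1)
    -- int(str(max) + str(second_max)); the parse of the digit string never fails
    match PySem.Int.ofChars? (PySem.Int.toChars p.1 ++ PySem.Int.toChars second_max) with
    | some v => v
    | none => 0
  else
    p.1
termination_by (if PySem.Str.len current_str = 0 then 1 else 0 : Nat)
decreasing_by
  have h' : current_str = "" := String.toList_eq_nil_iff.mp
    (List.length_eq_zero_iff.mp (by simpa [PySem.Str.len] using h))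
  simp [pvToChars_ne_nil, h']

-- ===== PORT B =====
def find_maximum_joltages_alt (joltages : List Int) (current_str : String) : Int :=
  let p := (PySem.List.enumerate (PySem.List.slice joltages none (some (-1)))).foldl
      (fun (st : Int × Int) ij => if ij.2 > st.1 then (ij.2, ij.1) else st) (0, 0)
  if ¬ PySem.Str.len current_str = 0 then
    p.1
  else
    let second := (PySem.List.slice joltages (some (p.2 + 1)) none).foldl
        (fun s j => if j > s then j else s) 0
    match PySem.Int.ofChars? (PySem.Int.toChars p.1 ++ PySem.Int.toChars second) with
    | some v => v
    | none => 0

-- ===== PRECONDITION & SPEC =====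
def Spec_find_maximum_joltages (joltages : List Int) (current_str : String) (out : Int) : Prop := out = find_maximum_joltages_alt joltages current_str
instance (joltages : List Int) (current_str : String) (out : Int) : Decidable (Spec_find_maximum_joltages joltages current_str out) := by unfold Spec_find_maximum_joltages; infer_instance

-- ===== CLAIM (what is proved, stated in full; the proofs are below) =====
def Claim_equal_find_maximum_joltages : Prop := ∀ (joltages : List Int) (current_str : String), Dom_find_maximum_joltages joltages current_str → Spec_find_maximum_joltages joltages current_str (find_maximum_joltages joltages current_str)

-- ===== LEMMAS AND PROOFS =====

-- str(n) has nonzero length (used to reduce A's inner recursive call)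
theorem pvToStr_len_ne (n : Int) : ¬ PySem.Str.len (PySem.Int.toStr n) = 0 := by
  unfold PySem.Str.len
  rw [PySem.Int.toList_toStr]
  have := pvToChars_ne_nil n
  intro h
  exact this (List.length_eq_zero_iff.mp (by exact_mod_cast h))


-- the fold over the enumerated list yields, in its first component, the plain value fold
theorem pvFold_enum_fst (ys : List Int) : ∀ (s : Int) (m pos : Int),
    ((PySem.List.enumerate ys s).foldl
      (fun (st : Int × Int) ij => if ij.2 > st.1 then (ij.2, ij.1) else st) (m, pos)).1
    = ys.foldl (fun a j => if j > a then j else a) m := by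
  induction ys with
  | nil => intro s m pos; simp [PySem.List.enumerate_nil]
  | cons y ys ih =>
    intro s m pos
    rw [PySem.List.enumerate_cons]
    simp only [List.foldl]
    by_cases hy : y > m
    · rw [if_pos hy, if_pos hy, ih]
    · rw [if_neg hy, if_neg hy, ih]

-- dropping the appended sentinel: dropLast ((xs ++ [0]).drop k) = xs.drop k
theorem pvDropLast_append_drop (xs : List Int) (k : ℕ) :
    ((xs ++ [(0 : Int)]).drop k).dropLast = xs.drop k := by
  rw [List.drop_append]
  by_cases hk : k ≤ xs.length
  · have : k - xs.length = 0 := by omega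
    rw [this]
    simp
  · have h1 : xs.drop k = [] := List.drop_eq_nil_of_le (by omega)
    have h2 : ([(0 : Int)]).drop (k - xs.length) = [] := List.drop_eq_nil_of_le (by simp; omega)
    simp [h1, h2]

-- the position component of the fold stays nonnegative (enumerate starts at 0)
theorem pvFold_pos_nonneg (ys : List Int) : ∀ (s m pos : Int), 0 ≤ s → 0 ≤ pos →
    0 ≤ ((PySem.List.enumerate ys s).foldl
      (fun (st : Int × Int) ij => if ij.2 > st.1 then (ij.2, ij.1) else st) (m, pos)).2 := by
  induction ys with
  | nil => intro s m pos hs hp; simpa [PySem.List.enumerate_nil] using hp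
  | cons y ys ih =>
    intro s m pos hs hp
    rw [PySem.List.enumerate_cons]
    simp only [List.foldl]
    by_cases hy : y > m
    · rw [if_pos hy]; exact ih (s + 1) y s (by omega) hs
    · rw [if_neg hy]; exact ih (s + 1) m pos (by omega) hp

-- ===== VERDICT (by name: the statement is the Claim_ definition above) =====
theorem find_maximum_joltages_spec : Claim_equal_find_maximum_joltages := by
  unfold Claim_equal_find_maximum_joltages Spec_find_maximum_joltages
  intro joltages current_str _
  by_cases h : PySem.Str.len current_str = 0
  · rw [find_maximum_joltages.eq_def, find_maximum_joltages_alt]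
    simp only [dif_pos h, if_neg (not_not_intro h)]
    have hpos : 0 ≤ ((PySem.List.enumerate (PySem.List.slice joltages none (some (-1)))).foldl
        (fun (st : Int × Int) ij => if ij.2 > st.1 then (ij.2, ij.1) else st) (0, 0)).2 :=
      pvFold_pos_nonneg _ 0 0 0 le_rfl le_rfl
    set P := (PySem.List.enumerate (PySem.List.slice joltages none (some (-1)))).foldl
        (fun (st : Int × Int) ij => if ij.2 > st.1 then (ij.2, ij.1) else st) (0, 0) with hP
    congr 2
    rw [find_maximum_joltages.eq_def]
    simp only [dif_neg (pvToStr_len_ne P.1)]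
    rw [PySem.List.slice_from (joltages ++ [0]) (by omega),
        PySem.List.slice_to_neg_one, pvDropLast_append_drop, pvFold_enum_fst,
        PySem.List.slice_from joltages (by omega), pvFold_enum_fst]
  · rw [find_maximum_joltages.eq_def, find_maximum_joltages_alt]
    simp only [dif_neg h, if_pos h]
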